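-- pv_equiv track=rewrite | github.com/TonyBarnett/python_uncertainty | uncertainty/data_sources/model_data_sources.py | _transpose_tuple
-- ===== SOURCE A (Python) =====
-- def _transpose_tuple(data: tuple) -> tuple:
--     transposed = dict()
--     for j, rows in enumerate(data):
--         for i, value in enumerate(rows):
--             if i not in transposed:
--                 transposed[i] = dict()
--             transposed[i][j] = value
--
--     output = list()
--     for i in sorted(transposed.keys()):
--         row = list()
--         for j in sorted(transposed[i].keys()):
--             row.append(transposed[i][j])
--         output.append(tuple(row))
--     return tuple(output)
-- ===== SOURCE B (Python) =====
-- def _transpose_tuple(data: tuple) -> tuple: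
--     max_len = max((len(r) for r in data), default=0)
--     return tuple(tuple(r[i] for r in data if i < len(r)) for i in range(max_len))
-- ===== Notes on version B (the rewrite author's own statement) =====
-- stated objective: simpler
-- what changed: Replaces the dict-of-dicts index table plus two sorting passes by a direct column iteration: for each column index below the maximum row length, collect r[i] from the rows long enough, in row order.
import Mathlib
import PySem

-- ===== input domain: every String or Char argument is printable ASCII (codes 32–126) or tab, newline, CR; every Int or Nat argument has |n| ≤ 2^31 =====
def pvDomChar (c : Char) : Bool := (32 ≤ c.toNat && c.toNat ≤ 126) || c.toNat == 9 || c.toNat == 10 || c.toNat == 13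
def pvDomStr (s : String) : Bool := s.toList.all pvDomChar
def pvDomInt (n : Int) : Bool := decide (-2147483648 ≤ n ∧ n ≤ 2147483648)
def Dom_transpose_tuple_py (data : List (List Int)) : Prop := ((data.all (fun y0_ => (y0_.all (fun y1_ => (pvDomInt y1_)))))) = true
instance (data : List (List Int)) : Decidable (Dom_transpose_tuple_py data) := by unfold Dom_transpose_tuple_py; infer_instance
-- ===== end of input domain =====

-- B changes the algorithm: direct column iteration (max row length, then one filtered pass per
-- column) instead of A's dict-of-dicts index table with two sorting passes; objective: simpler.

-- ===== PORT A =====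
-- body of A's inner loop: 'if i not in transposed: transposed[i] = dict(); transposed[i][j] = value'
def aInnerStep (j : Int) (t : PySem.Dict Int (PySem.Dict Int Int)) (iv : Int × Int) :
    PySem.Dict Int (PySem.Dict Int Int) :=
  let t1 := if t.contains iv.1 then t else t.insert iv.1 PySem.Dict.empty
  -- 'transposed[i]' : the key is present here (just ensured), so getD never falls back
  t1.insert iv.1 ((t1.getD iv.1 PySem.Dict.empty).insert j iv.2)

-- body of A's outer loop: 'for i, value in enumerate(rows): …'
def aRowStep (t : PySem.Dict Int (PySem.Dict Int Int)) (jr : Int × List Int) :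
    PySem.Dict Int (PySem.Dict Int Int) :=
  (PySem.List.enumerate jr.2).foldl (aInnerStep jr.1) t

def transpose_tuple_py (data : List (List Int)) : List (List Int) :=
  let transposed := (PySem.List.enumerate data).foldl aRowStep PySem.Dict.empty
  (PySem.List.sorted transposed.keys (fun x => x) false).foldl (fun output i =>
    -- 'transposed[i]' / 'transposed[i][j]' : keys come from the dicts themselves, getD never falls back
    let inner := transposed.getD i PySem.Dict.empty
    output ++ [(PySem.List.sorted inner.keys (fun x => x) false).foldl
      (fun row j => row ++ [inner.getD j 0]) []]) []

-- ===== PORT B =====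
-- 'r[i] for r in data if i < len(r)': r[i]? is some exactly when i < len r, so the
-- filtered comprehension is List.filterMap (fun r => r[i]?).
def transpose_tuple_py_alt (data : List (List Int)) : List (List Int) :=
  let maxLen : Nat := data.foldl (fun m r => max m r.length) 0
  (List.range maxLen).map (fun i => data.filterMap (fun r => r[i]?))

-- ===== PRECONDITION & SPEC =====
def Spec_transpose_tuple_py (data : List (List Int)) (out : List (List Int)) : Prop := out = transpose_tuple_py_alt data
instance (data : List (List Int)) (out : List (List Int)) : Decidable (Spec_transpose_tuple_py data out) := by unfold Spec_transpose_tuple_py; infer_instance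

-- ===== CLAIM (what is proved, stated in full; the proofs are below) =====
def Claim_equal_transpose_tuple_py : Prop := ∀ (data : List (List Int)), Dom_transpose_tuple_py data → Spec_transpose_tuple_py data (transpose_tuple_py data)

-- ===== LEMMAS AND PROOFS =====

-- A dict whose items are the columns 0..n-1 in order, with values f k.
def mkRange {ν : Type} (n : Nat) (f : Nat → ν) : PySem.Dict Int ν :=
  PySem.Dict.mk ((List.range n).map (fun (k : Nat) => ((k : Int), f k)))

-- f extended by Dict.empty beyond n
def gext {ν : Type} (n : Nat) (g : Nat → PySem.Dict Int ν) (k : Nat) : PySem.Dict Int ν :=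
  if k < n then g k else PySem.Dict.empty

def maxLenL (l : List (List Int)) : Nat := l.foldl (fun m r => max m r.length) 0

-- per-column effect of one row of A's outer loop
def colStep (k : Nat) (d : PySem.Dict Int Int) (p : Int × List Int) : PySem.Dict Int Int :=
  match p.2[k]? with
  | some v => d.insert p.1 v
  | none => d

-- the (j, value) pairs column k receives, in row order
def innerList (l : List (List Int)) (s : Int) (k : Nat) : List (Int × Int) :=
  (PySem.List.enumerate l s).filterMap (fun p => (p.2[k]?).map (fun v => (p.1, v)))

lemma mkRange_congr {ν : Type} (n : Nat) (f g : Nat → ν) (h : ∀ k, k < n → f k = g k) :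
    mkRange n f = mkRange n g := by
  unfold mkRange
  congr 1
  exact List.map_congr_left (fun k hk => by rw [h k (List.mem_range.mp hk)])

lemma keys_mkRange {ν : Type} (n : Nat) (f : Nat → ν) :
    (mkRange n f).keys = (List.range n).map (fun (k : Nat) => (k : Int)) := by
  simp [mkRange, PySem.Dict.keys]

lemma nodup_keys_mkRange {ν : Type} (n : Nat) (f : Nat → ν) : (mkRange n f).keys.Nodup := by
  rw [keys_mkRange]
  exact List.nodup_range.map (fun a b h => by exact_mod_cast h)

lemma mem_keys_mkRange {ν : Type} (n : Nat) (f : Nat → ν) (x : Int) :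
    x ∈ (mkRange n f).keys ↔ ∃ k : Nat, k < n ∧ x = (k : Int) := by
  rw [keys_mkRange]
  simp [List.mem_map, eq_comm]

lemma contains_mkRange {ν : Type} (n : Nat) (f : Nat → ν) (i : Nat) :
    (mkRange n f).contains (i : Int) = decide (i < n) := by
  rw [PySem.Dict.contains_eq_decide_mem_keys]
  by_cases h : i < n
  · simp [h, mem_keys_mkRange]
  · simp only [h, decide_false, decide_eq_false_iff_not, mem_keys_mkRange]
    rintro ⟨k, hk, he⟩
    have : i = k := by exact_mod_cast he
    omega

lemma getD_mkRange {ν : Type} (n : Nat) (f : Nat → ν) (i : Nat) (d0 : ν) :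
    (mkRange n f).getD (i : Int) d0 = if i < n then f i else d0 := by
  by_cases h : i < n
  · rw [if_pos h]
    refine PySem.Dict.getD_of_mem_items _ ?_ (nodup_keys_mkRange n f) d0
    unfold mkRange
    exact List.mem_map.mpr ⟨i, List.mem_range.mpr h, rfl⟩
  · rw [if_neg h]
    refine PySem.Dict.getD_of_not_contains _ d0 ?_
    rw [contains_mkRange]
    simpa using h

lemma insert_mkRange_lt {ν : Type} (n : Nat) (f : Nat → ν) (i : Nat) (hi : i < n) (v : ν) :
    (mkRange n f).insert (i : Int) v = mkRange n (fun k => if k = i then v else f k) := by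
  apply PySem.Dict.ext
  rw [PySem.Dict.items_insert_of_contains _ v (by rw [contains_mkRange]; simpa using hi)]
  unfold mkRange
  simp only [List.map_map]
  refine List.map_congr_left (fun k hk => ?_)
  by_cases hki : k = i
  · subst hki; simp
  · have : ((k : Int) == (i : Int)) = false := by
      simp only [beq_eq_false_iff_ne, ne_eq, Int.natCast_inj]; exact hki
    simp [hki]

lemma insert_mkRange_eq {ν : Type} (n : Nat) (f : Nat → ν) (v : ν) :
    (mkRange n f).insert (n : Int) v = mkRange (n + 1) (fun k => if k = n then v else f k) := by
  apply PySem.Dict.ext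
  rw [PySem.Dict.items_insert_of_not_contains _ v (by rw [contains_mkRange]; simp)]
  unfold mkRange
  simp only [List.range_succ, List.map_append]
  congr 1
  · refine List.map_congr_left (fun k hk => ?_)
    have : k ≠ n := by have := List.mem_range.mp hk; omega
    simp [this]
  · simp

lemma gext_lt {ν : Type} (n : Nat) (g : Nat → PySem.Dict Int ν) (k : Nat) (h : k < n) :
    gext n g k = g k := if_pos h

lemma inner_fold (r : List Int) (s : Nat) (j : Int) (n : Nat) (g : Nat → PySem.Dict Int Int)
    (hs : s ≤ n) :
    (PySem.List.enumerate r (s : Int)).foldl (aInnerStep j) (mkRange n g)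
    = mkRange (max n (s + r.length)) (fun k =>
        if s ≤ k ∧ k < s + r.length then (gext n g k).insert j ((r[k - s]?).getD 0)
        else gext n g k) := by
  induction r generalizing s n g with
  | nil =>
    simp only [PySem.List.enumerate_nil, List.foldl_nil, List.length_nil, Nat.add_zero,
      Nat.max_eq_left hs]
    refine (mkRange_congr _ _ _ (fun k hk => ?_)).symm
    have : ¬ (s ≤ k ∧ k < s) := by omega
    rw [if_neg this, gext_lt _ _ _ hk]
  | cons v rest ih =>
    rw [PySem.List.enumerate_cons, List.foldl_cons]
    have hstep : aInnerStep j (mkRange n g) ((s : Int), v)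
        = mkRange (max n (s + 1)) (fun k => if k = s then (gext n g s).insert j v else g k) := by
      unfold aInnerStep
      by_cases h : s < n
      · simp only [contains_mkRange, h, decide_true, if_true]
        have hget : (mkRange n g).getD ((s : Nat) : Int) PySem.Dict.empty = g s := by
          rw [getD_mkRange, if_pos h]
        rw [hget, insert_mkRange_lt n g s h, Nat.max_eq_left (by omega : s + 1 ≤ n)]
        refine mkRange_congr _ _ _ (fun k hk => ?_)
        by_cases hk' : k = s <;> simp [hk', gext, h]
      · have hsn : s = n := by omega
        subst hsn
        simp only [contains_mkRange, Nat.lt_irrefl, decide_false, Bool.false_eq_true, if_false]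
        rw [insert_mkRange_eq s g PySem.Dict.empty]
        have hget : (mkRange (s + 1) (fun k => if k = s then PySem.Dict.empty else g k)).getD
            ((s : Nat) : Int) PySem.Dict.empty = PySem.Dict.empty := by
          rw [getD_mkRange]; simp
        rw [hget, insert_mkRange_lt _ _ s (Nat.lt_succ_self s), Nat.max_eq_right (by omega)]
        refine mkRange_congr _ _ _ (fun k hk => ?_)
        by_cases hk' : k = s <;> simp [hk', gext]
    have hcast : (s : Int) + 1 = ((s + 1 : Nat) : Int) := by push_cast; ring
    rw [hstep, hcast, ih (s + 1) (max n (s + 1)) _ (Nat.le_max_right n (s + 1))]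
    rw [Nat.max_assoc]
    have hm : max (s + 1) (s + 1 + rest.length) = s + (v :: rest).length := by
      simp only [List.length_cons]; omega
    rw [hm]
    refine mkRange_congr _ _ _ (fun k hk => ?_)
    by_cases hks : k = s
    · subst hks
      have h1 : ¬ (k + 1 ≤ k ∧ k < k + 1 + rest.length) := by omega
      have h2 : k ≤ k ∧ k < k + (v :: rest).length := by simp only [List.length_cons]; omega
      rw [if_neg h1, if_pos h2, gext_lt _ _ k (by omega)]
      simp
    · have hg : gext (max n (s + 1)) (fun k => if k = s then (gext n g s).insert j v else g k) k
          = gext n g k := by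
        simp only [gext]
        by_cases hkn : k < n
        · simp [hkn, hks, show k < max n (s + 1) by omega]
        · have hk1 : ¬ k < max n (s + 1) := by omega
          simp [hkn, hk1]
      rw [hg]
      by_cases hkr : s + 1 ≤ k ∧ k < s + 1 + rest.length
      · have hkr' : s ≤ k ∧ k < s + (v :: rest).length := by
          simp only [List.length_cons]; omega
        rw [if_pos hkr, if_pos hkr']
        have : (v :: rest)[k - s]? = rest[k - (s + 1)]? := by
          have hke : k - s = (k - (s + 1)) + 1 := by omega
          rw [hke]; simp
        rw [this]
      · have hkr' : ¬ (s ≤ k ∧ k < s + (v :: rest).length) := by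
          simp only [List.length_cons]; omega
        rw [if_neg hkr, if_neg hkr']

lemma foldl_max_base (l : List (List Int)) (b : Nat) :
    l.foldl (fun m r => max m r.length) b
    = max b (l.foldl (fun m r => max m r.length) 0) := by
  induction l generalizing b with
  | nil => simp only [List.foldl_nil]; omega
  | cons r rest ih =>
    simp only [List.foldl_cons]
    rw [ih (max b r.length), ih (max 0 r.length)]
    omega

lemma maxLenL_cons (r : List Int) (rest : List (List Int)) :
    maxLenL (r :: rest) = max r.length (maxLenL rest) := by
  unfold maxLenL
  rw [List.foldl_cons, foldl_max_base rest (max 0 r.length)]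
  omega

lemma outer_fold (l : List (List Int)) (j : Int) (n : Nat) (g : Nat → PySem.Dict Int Int) :
    (PySem.List.enumerate l j).foldl aRowStep (mkRange n g)
    = mkRange (max n (maxLenL l)) (fun k =>
        (PySem.List.enumerate l j).foldl (colStep k) (gext n g k)) := by
  induction l generalizing j n g with
  | nil =>
    simp only [PySem.List.enumerate_nil, List.foldl_nil, maxLenL, Nat.max_zero]
    exact mkRange_congr _ _ _ (fun k hk => (gext_lt n g k hk).symm)
  | cons r rest ih =>
    rw [PySem.List.enumerate_cons, List.foldl_cons]
    have hrow : aRowStep (mkRange n g) (j, r)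
        = mkRange (max n r.length) (fun k =>
            if k < r.length then (gext n g k).insert j ((r[k]?).getD 0) else gext n g k) := by
      unfold aRowStep
      have h0 : (0 : Int) = ((0 : Nat) : Int) := rfl
      have := inner_fold r 0 j n g (Nat.zero_le n)
      simp only [Nat.zero_add, Nat.zero_le, true_and, Nat.sub_zero] at this
      exact this
    rw [hrow, ih]
    have hm : max (max n r.length) (maxLenL rest) = max n (maxLenL (r :: rest)) := by
      rw [maxLenL_cons]; omega
    rw [hm]
    refine mkRange_congr _ _ _ (fun k hk => ?_)
    rw [List.foldl_cons]
    congr 1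
    show gext (max n r.length) _ k = colStep k (gext n g k) (j, r)
    unfold colStep gext
    by_cases hkr : k < r.length
    · have : r[k]? = some (r[k]'hkr) := List.getElem?_eq_getElem hkr
      rw [if_pos (by omega)]
      simp only [this, if_pos hkr, Option.getD_some]
    · have : r[k]? = none := List.getElem?_eq_none (by omega)
      simp only [this]
      by_cases hkn : k < n
      · simp [hkn, hkr, show k < max n r.length by omega]
      · have hk1 : ¬ k < max n r.length := by omega
        simp [hkn, hk1]

lemma col_fold_items (l : List (List Int)) (s : Int) (k : Nat) (d : PySem.Dict Int Int)
    (hb : ∀ x ∈ d.keys, x < s) :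
    (PySem.List.enumerate l s).foldl (colStep k) d
    = PySem.Dict.mk (d.items ++ innerList l s k) := by
  induction l generalizing s d with
  | nil =>
    simp only [PySem.List.enumerate_nil, List.foldl_nil, innerList, List.filterMap_nil,
      List.append_nil]
  | cons r rest ih =>
    rw [PySem.List.enumerate_cons, List.foldl_cons]
    have hinner : innerList (r :: rest) s k
        = (match r[k]? with | some v => [(s, v)] | none => []) ++ innerList rest (s + 1) k := by
      unfold innerList
      rw [PySem.List.enumerate_cons, List.filterMap_cons]
      cases r[k]? <;> simp
    rw [hinner]
    cases hrk : r[k]? with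
    | none =>
      simp only [colStep, hrk]
      rw [ih (s + 1) d (fun x hx => lt_trans (hb x hx) (by omega))]
      simp
    | some v =>
      simp only [colStep, hrk]
      have hnc : d.contains s = false := by
        rw [PySem.Dict.contains_eq_decide_mem_keys]
        simp only [decide_eq_false_iff_not]
        intro hmem
        exact absurd (hb _ hmem) (by omega)
      have hitems : (d.insert s v).items = d.items ++ [(s, v)] :=
        PySem.Dict.items_insert_of_not_contains d v hnc
      have hkeys : ∀ x ∈ (d.insert s v).keys, x < s + 1 := by
        intro x hx
        rcases (PySem.Dict.mem_keys_insert _ _ _ _).mp hx with h | h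
        · omega
        · have := hb x h; omega
      rw [ih (s + 1) _ hkeys, hitems]
      simp

lemma innerList_fst_bound (l : List (List Int)) (s : Int) (k : Nat) :
    (∀ q ∈ innerList l s k, s ≤ q.1) ∧
    ((innerList l s k).map (·.1)).Pairwise (· < ·) := by
  induction l generalizing s with
  | nil => simp [innerList]
  | cons r rest ih =>
    have hinner : innerList (r :: rest) s k
        = (match r[k]? with | some v => [(s, v)] | none => []) ++ innerList rest (s + 1) k := by
      unfold innerList
      rw [PySem.List.enumerate_cons, List.filterMap_cons]
      cases r[k]? <;> simp
    obtain ⟨ihb, ihp⟩ := ih (s + 1)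
    rw [hinner]
    cases r[k]? with
    | none =>
      simp only [List.nil_append]
      exact ⟨fun q hq => le_trans (by omega) (ihb q hq), ihp⟩
    | some v =>
      constructor
      · intro q hq
        rcases List.mem_append.mp hq with h | h
        · simp at h; subst h; simp
        · exact le_trans (by omega) (ihb q h)
      · simp only [List.map_append, List.map_cons, List.map_nil]
        rw [List.pairwise_append]
        refine ⟨List.pairwise_singleton _ _, ihp, ?_⟩
        intro a ha b hb
        simp at ha; subst ha
        rcases List.mem_map.mp hb with ⟨q, hq, hqe⟩
        have := ihb q hq
        omega

lemma innerList_snd (l : List (List Int)) (s : Int) (k : Nat) :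
    (innerList l s k).map (·.2) = l.filterMap (fun r => r[k]?) := by
  induction l generalizing s with
  | nil => simp [innerList]
  | cons r rest ih =>
    have hinner : innerList (r :: rest) s k
        = (match r[k]? with | some v => [(s, v)] | none => []) ++ innerList rest (s + 1) k := by
      unfold innerList
      rw [PySem.List.enumerate_cons, List.filterMap_cons]
      cases r[k]? <;> simp
    rw [hinner, List.filterMap_cons]
    cases r[k]? <;> simp [ih (s + 1)]

-- ===== VERDICT (by name: the statement is the Claim_ definition above) =====
theorem transpose_tuple_py_spec : Claim_equal_transpose_tuple_py := by
  intro data _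
  show transpose_tuple_py data = transpose_tuple_py_alt data
  simp only [transpose_tuple_py, transpose_tuple_py_alt]
  have h0 : (PySem.Dict.empty : PySem.Dict Int (PySem.Dict Int Int))
      = mkRange 0 (fun _ => PySem.Dict.empty) := by
    apply PySem.Dict.ext; rfl
  rw [h0, outer_fold data 0 0 (fun _ => PySem.Dict.empty)]
  have htrans : mkRange (max 0 (maxLenL data)) (fun k =>
      (PySem.List.enumerate data 0).foldl (colStep k)
        (gext 0 (fun _ => PySem.Dict.empty) k))
      = mkRange (maxLenL data) (fun k => PySem.Dict.mk (innerList data 0 k)) := by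
    rw [Nat.zero_max]
    refine mkRange_congr _ _ _ (fun k hk => ?_)
    have hg : gext 0 (fun _ => (PySem.Dict.empty : PySem.Dict Int Int)) k = PySem.Dict.empty := by simp [gext]
    rw [hg, col_fold_items data 0 k PySem.Dict.empty (by simp)]
    simp [PySem.Dict.empty]
  rw [htrans, keys_mkRange]
  have hsort : PySem.List.sorted ((List.range (maxLenL data)).map (fun (k : Nat) => (k : Int)))
      (fun x => x) false = (List.range (maxLenL data)).map (fun (k : Nat) => (k : Int)) := by
    apply PySem.List.sorted_eq_self_of_pairwise
    refine List.Pairwise.map _ ?_ List.pairwise_lt_range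
    intro a b hab
    exact_mod_cast le_of_lt hab
  rw [hsort, PySem.List.foldl_append_singleton_eq_map, List.nil_append, List.map_map]
  rw [show data.foldl (fun m r => max m r.length) 0 = maxLenL data from rfl]
  refine List.map_congr_left (fun k hk => ?_)
  have hkM : k < maxLenL data := List.mem_range.mp hk
  have hinner : (mkRange (maxLenL data) (fun k => PySem.Dict.mk (innerList data 0 k))).getD
      ((k : Nat) : Int) PySem.Dict.empty = PySem.Dict.mk (innerList data 0 k) := by
    rw [getD_mkRange, if_pos hkM]
  simp only [Function.comp, hinner]
  have hpl : ((innerList data 0 k).map (·.1)).Pairwise (· < ·) :=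
    (innerList_fst_bound data 0 k).2
  have hkeys : (PySem.Dict.mk (innerList data 0 k)).keys = (innerList data 0 k).map (·.1) := by
    simp [PySem.Dict.keys]
  have hnodup : (PySem.Dict.mk (innerList data 0 k)).keys.Nodup := by
    rw [hkeys]
    exact hpl.imp (fun h => ne_of_lt h)
  have hsort2 : PySem.List.sorted (PySem.Dict.mk (innerList data 0 k)).keys
      (fun x => x) false = (innerList data 0 k).map (·.1) := by
    rw [hkeys]
    exact PySem.List.sorted_eq_self_of_pairwise _ _ (hpl.imp (fun h => le_of_lt h))
  rw [hsort2, PySem.List.foldl_append_singleton_eq_map, List.nil_append, List.map_map]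
  rw [← innerList_snd data 0 k]
  refine List.map_congr_left (fun p hp => ?_)
  obtain ⟨p1, p2⟩ := p
  exact PySem.Dict.getD_of_mem_items _ hp hnodup 0
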